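-- pv_equiv track=rewrite | github.com/joohyuk2074/TIL_PRACTICE_CODE | python-algorithm/programmers/level2/시소 짝궁.py | solution
-- ===== SOURCE A (Python) =====
-- def solution(weights):
--     answer = 0
--
--     # 시소 거리에 따른 무게 배열
--     weights_distance = [0] * 4001
--     # 실제 무게 배열
--     weight_arr = [0] * 1001
--
--     for weight in weights:
--         # 시소의 거리에 따른 무게
--         score1 = weight * 2
--         score2 = weight * 3
--         score3 = weight * 4
--
--         # 이전에 지나간 사람이 현재 해당 무게와 일치하는 값이 있으면 각각의 사람들과 시소짝궁으로 추가함
--         answer += weights_distance[score1]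
--         answer += weights_distance[score2]
--         answer += weights_distance[score3]
--
--         if weight_arr[weight] > 0:
--             answer -= weight_arr[weight] * 2
--
--         weight_arr[weight] += 1
--         weights_distance[score1] += 1
--         weights_distance[score2] += 1
--         weights_distance[score3] += 1
--
--     return answer
-- ===== SOURCE B (Python) =====
-- def solution(weights):
--     freq = {}
--     for w in weights:
--         freq[w] = freq.get(w, 0) + 1
--     answer = 0
--     for a, n in freq.items():
--         answer += n * (n - 1) // 2
--         partners = [2 * a]
--         if a % 2 == 0:
--             partners.append(3 * a // 2)
--         if a % 3 == 0:
--             partners.append(4 * a // 3)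
--         for b in partners:
--             if b > a and b in freq:
--                 answer += n * freq[b]
--     return answer
-- ===== Notes on version B (the rewrite author's own statement) =====
-- stated objective: simpler
-- what changed: Replaces the streaming scan with its two running-count arrays (4001/1001 slots, triple distance bookkeeping and an equal-weight correction) by a frequency table scanned once over distinct weights: n*(n-1)//2 for equal pairs plus ratio-based partner lookups (2a, 3a/2 if even, 4a/3 if divisible by 3).
-- outside the precondition, e.g. on solution([0, 0]): A returns 7, B returns 1; on solution([-667, 1000]): A returns 1, B returns 0
import Mathlib
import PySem

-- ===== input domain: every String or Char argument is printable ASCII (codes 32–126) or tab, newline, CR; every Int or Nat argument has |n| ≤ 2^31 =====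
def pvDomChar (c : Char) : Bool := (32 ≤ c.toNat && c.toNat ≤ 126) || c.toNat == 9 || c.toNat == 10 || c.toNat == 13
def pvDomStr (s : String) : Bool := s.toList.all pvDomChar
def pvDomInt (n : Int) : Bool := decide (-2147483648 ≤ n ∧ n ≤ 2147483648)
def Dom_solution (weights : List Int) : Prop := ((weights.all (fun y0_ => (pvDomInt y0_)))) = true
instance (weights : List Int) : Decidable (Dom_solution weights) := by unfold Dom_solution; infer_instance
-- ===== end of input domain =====

set_option maxRecDepth 8192


-- B replaces A's streaming scan with its two running-count arrays by a frequency table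
-- scanned once over distinct weights (n*(n-1)//2 equal pairs plus ratio-based partner
-- lookups); objective: simpler, same O(n) cost.

-- ===== PORT A =====
-- the loop body; arrays are Lists indexed via PySem.List.pyGetD/pySetD,
-- exact on in-range indices (guaranteed by Pre_solution)
def solutionStep (st : Int × List Int × List Int) (weight : Int) : Int × List Int × List Int :=
  let answer := st.1
  let weights_distance := st.2.1
  let weight_arr := st.2.2
  let score1 := weight * 2
  let score2 := weight * 3
  let score3 := weight * 4
  let answer := answer + PySem.List.pyGetD weights_distance score1 0
  let answer := answer + PySem.List.pyGetD weights_distance score2 0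
  let answer := answer + PySem.List.pyGetD weights_distance score3 0
  let answer := if PySem.List.pyGetD weight_arr weight 0 > 0 then
      answer - PySem.List.pyGetD weight_arr weight 0 * 2 else answer
  let weight_arr := PySem.List.pySetD weight_arr weight
      (PySem.List.pyGetD weight_arr weight 0 + 1)
  let weights_distance := PySem.List.pySetD weights_distance score1
      (PySem.List.pyGetD weights_distance score1 0 + 1)
  let weights_distance := PySem.List.pySetD weights_distance score2
      (PySem.List.pyGetD weights_distance score2 0 + 1)
  let weights_distance := PySem.List.pySetD weights_distance score3
      (PySem.List.pyGetD weights_distance score3 0 + 1)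
  (answer, weights_distance, weight_arr)

def solution (weights : List Int) : Int :=
  (weights.foldl solutionStep (0, List.replicate 4001 0, List.replicate 1001 0)).1

-- ===== PORT B =====
-- body of the loop over freq.items (freq is the finished frequency table)
def solutionAltStep (freq : PySem.Dict Int Int) (answer : Int) (p : Int × Int) : Int :=
  let a := p.1
  let n := p.2
  let answer := answer + PySem.Int.floordiv (n * (n - 1)) 2
  let partners := [2 * a]
  let partners := if PySem.Int.mod a 2 = 0 then partners ++ [PySem.Int.floordiv (3 * a) 2] else partners
  let partners := if PySem.Int.mod a 3 = 0 then partners ++ [PySem.Int.floordiv (4 * a) 3] else partners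
  partners.foldl
    (fun (answer : Int) (b : Int) =>
      if a < b ∧ freq.contains b then answer + n * freq.getD b 0 else answer)
    answer

def solution_alt (weights : List Int) : Int :=
  let freq := weights.foldl (fun d w => d.insert w (d.getD w 0 + 1)) PySem.Dict.empty
  freq.items.foldl (solutionAltStep freq) 0

-- ===== PRECONDITION & SPEC =====
-- Pre_solution restricts to the problem's natural weight domain 1..1000: weights above
-- 1000 or below -1000 make A raise IndexError, and for weights ≤ 0 A's returned value is
-- an artifact of its array implementation (at weight 0 the three doubled distances
-- coincide and equal pairs are counted 7× instead of once; negative weights are read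
-- back via Python negative-index wraparound).
def Pre_solution (weights : List Int) : Prop := ∀ w ∈ weights, 1 ≤ w ∧ w ≤ 1000
instance (weights : List Int) : Decidable (Pre_solution weights) := by unfold Pre_solution; infer_instance
def pvWitness_solution : List Int := [100, 200, 150, 100]

def Spec_solution (weights : List Int) (out : Int) : Prop := out = solution_alt weights
instance (weights : List Int) (out : Int) : Decidable (Spec_solution weights out) := by unfold Spec_solution; infer_instance

-- ===== CLAIM (what is proved, stated in full; the proofs are below) =====
def Claim_equal_solution : Prop := ∀ (weights : List Int), Dom_solution weights → Pre_solution weights → Spec_solution weights (solution weights)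

-- ===== LEMMAS AND PROOFS =====

-- count of v in l, as an Int
def pvCnt (l : List Int) (v : Int) : Int := (l.count v : Int)

-- what A's weights_distance array holds at slot k, for the processed prefix p
def pvD (p : List Int) (k : Int) : Int :=
  (p.map (fun u => (if u * 2 = k then (1:Int) else 0) + (if u * 3 = k then 1 else 0)
      + (if u * 4 = k then 1 else 0))).sum

-- what one iteration of A's loop adds to answer, given processed prefix p
def pvAdd (p : List Int) (w : Int) : Int :=
  pvD p (w * 2) + pvD p (w * 3) + pvD p (w * 4) - 2 * pvCnt p w

-- A's whole loop, abstractly: fold the per-step additions over the list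
def pvAPC : List Int → List Int → Int
  | _, [] => 0
  | p, w :: l => pvAdd p w + pvAPC (p ++ [w]) l

def pvCR (p l : List Int) : Int := (l.map (pvAdd p)).sum

-- the 7 partner-count contributions of w against a list l (pairing w with later elements)
def pvHd (l : List Int) (w : Int) : Int :=
  pvCnt l w + pvCnt l (2 * w)
  + (if w % 2 = 0 then pvCnt l (3 * w / 2) else 0)
  + (if w % 2 = 0 then pvCnt l (w / 2) else 0)
  + (if w % 3 = 0 then pvCnt l (4 * w / 3) else 0)
  + (if w % 3 = 0 then pvCnt l (2 * w / 3) else 0)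
  + (if w % 4 = 0 then pvCnt l (3 * w / 4) else 0)

def pvG : List Int → Int
  | [] => 0
  | w :: l => pvHd l w + pvG l

def pvC2 (n : Int) : Int := PySem.Int.floordiv (n * (n - 1)) 2

-- B's strictly-larger partner sum for a distinct weight a
def pvP (l : List Int) (a : Int) : Int :=
  pvCnt l (2 * a) + (if a % 2 = 0 then pvCnt l (3 * a / 2) else 0)
  + (if a % 3 = 0 then pvCnt l (4 * a / 3) else 0)

def pvF (l : List Int) (a : Int) : Int := pvC2 (pvCnt l a) + pvCnt l a * pvP l a

def pvSF (l : List Int) : Int := ∑ a ∈ l.toFinset, pvF l a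

-- indicator of "w is a strictly-larger partner of a"
def pvE (a w : Int) : Int :=
  (if 2 * a = w then 1 else 0) + (if a % 2 = 0 ∧ 3 * a / 2 = w then 1 else 0)
  + (if a % 3 = 0 ∧ 4 * a / 3 = w then 1 else 0)

lemma pv_getD_set (xs : List Int) (n k : ℕ) (v : Int) (hn : n < xs.length) :
    (xs.set n v).getD k 0 = if k = n then v else xs.getD k 0 := by
  rw [List.getD_eq_getElem?_getD, List.getD_eq_getElem?_getD, List.getElem?_set]
  by_cases h : n = k
  · subst h
    simp [hn]
  · have h' : ¬ k = n := fun hh => h hh.symm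
    rw [if_neg h, if_neg h']

lemma pv_getD_replicate (k n : ℕ) (h : k < n) : (List.replicate n (0:Int)).getD k 0 = 0 := by
  simp [List.getD_eq_getElem?_getD, h]

lemma pvCnt_nonneg (l : List Int) (v : Int) : 0 ≤ pvCnt l v := Int.natCast_nonneg _

lemma pvCnt_append (p q : List Int) (v : Int) : pvCnt (p ++ q) v = pvCnt p v + pvCnt q v := by
  simp [pvCnt, List.count_append]

lemma pvCnt_cons (w : Int) (l : List Int) (v : Int) :
    pvCnt (w :: l) v = pvCnt l v + (if v = w then 1 else 0) := by
  simp only [pvCnt, List.count_cons, beq_iff_eq]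
  split_ifs <;> push_cast <;> omega

lemma pvCnt_singleton (w v : Int) : pvCnt [w] v = if v = w then 1 else 0 := by
  simp only [pvCnt, List.count_singleton, beq_iff_eq]
  split_ifs <;> push_cast <;> omega

lemma pvD_append (p q : List Int) (k : Int) : pvD (p ++ q) k = pvD p k + pvD q k := by
  simp [pvD, List.sum_append]

lemma pvAdd_append (p q : List Int) (w : Int) :
    pvAdd (p ++ q) w = pvAdd p w + pvAdd q w := by
  simp only [pvAdd, pvD_append, pvCnt_append]; ring

lemma pvAdd_nil (w : Int) : pvAdd [] w = 0 := by simp [pvAdd, pvD, pvCnt]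

lemma pvCR_append (p q l : List Int) : pvCR (p ++ q) l = pvCR p l + pvCR q l := by
  induction l with
  | nil => simp [pvCR]
  | cons x l ih =>
    simp only [pvCR, List.map_cons, List.sum_cons] at *
    rw [pvAdd_append]; omega

lemma pvAPC_eq (l : List Int) : ∀ p, pvAPC p l = pvCR p l + pvAPC [] l := by
  induction l with
  | nil => intro p; simp [pvAPC, pvCR]
  | cons w l ih =>
    intro p
    show pvAdd p w + pvAPC (p ++ [w]) l = pvCR p (w :: l) + (pvAdd [] w + pvAPC ([] ++ [w]) l)
    rw [ih (p ++ [w]), ih ([] ++ [w]), pvAdd_nil]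
    simp only [List.nil_append] at *
    have h1 : pvCR (p ++ [w]) l = pvCR p l + pvCR [w] l := pvCR_append p [w] l
    have h2 : pvCR p (w :: l) = pvAdd p w + pvCR p l := by
      simp [pvCR, List.map_cons, List.sum_cons]
    omega

-- A's loop invariant: the two arrays hold pvD / pvCnt of the processed prefix
lemma solution_loop (l : List Int) : ∀ (p : List Int) (ans : Int) (wd wa : List Int),
    (∀ w ∈ l, 1 ≤ w ∧ w ≤ 1000) →
    wd.length = 4001 → wa.length = 1001 →
    (∀ k : ℕ, k < 4001 → wd.getD k 0 = pvD p (k : Int)) →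
    (∀ k : ℕ, k < 1001 → wa.getD k 0 = pvCnt p (k : Int)) →
    (l.foldl solutionStep (ans, wd, wa)).1 = ans + pvAPC p l := by
  induction l with
  | nil => intro p ans wd wa _ _ _ _ _; simp [pvAPC]
  | cons w l ih =>
    intro p ans wd wa hl hwd hwa Hd Ha
    obtain ⟨hw1, hw2⟩ := hl w (List.mem_cons_self)
    have e2n : w * 2 = (((w * 2).toNat : ℕ) : Int) := by omega
    have e3n : w * 3 = (((w * 3).toNat : ℕ) : Int) := by omega
    have e4n : w * 4 = (((w * 4).toNat : ℕ) : Int) := by omega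
    have h2lt : (w * 2).toNat < 4001 := by omega
    have h3lt : (w * 3).toNat < 4001 := by omega
    have h4lt : (w * 4).toNat < 4001 := by omega
    have hwlt : w.toNat < 1001 := by omega
    rw [List.foldl_cons]
    have hg2 : PySem.List.pyGetD wd (w * 2) 0 = pvD p (w * 2) := by
      rw [e2n, PySem.List.pyGetD_natCast]; exact Hd _ h2lt
    have hg3 : PySem.List.pyGetD wd (w * 3) 0 = pvD p (w * 3) := by
      rw [e3n, PySem.List.pyGetD_natCast]; exact Hd _ h3lt
    have hg4 : PySem.List.pyGetD wd (w * 4) 0 = pvD p (w * 4) := by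
      rw [e4n, PySem.List.pyGetD_natCast]; exact Hd _ h4lt
    have hgw : PySem.List.pyGetD wa w 0 = pvCnt p w := by
      rw [show w = ((w.toNat : ℕ) : Int) by omega, PySem.List.pyGetD_natCast]
      rw [show ((w.toNat : ℕ) : Int) = w by omega]
      have := Ha _ hwlt
      rw [show ((w.toNat : ℕ) : Int) = w by omega] at this
      exact this
    have hstep : solutionStep (ans, wd, wa) w =
        (ans + pvD p (w * 2) + pvD p (w * 3) + pvD p (w * 4) - 2 * pvCnt p w,
         ((wd.set (w * 2).toNat (pvD p (w * 2) + 1)).set (w * 3).toNat (pvD p (w * 3) + 1)).set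
           (w * 4).toNat (pvD p (w * 4) + 1),
         wa.set w.toNat (pvCnt p w + 1)) := by
      simp only [solutionStep, hg2, hg3, hg4, hgw]
      rw [PySem.List.pySetD_of_nonneg wa _ (show (0:Int) ≤ w by omega)]
      rw [PySem.List.pySetD_of_nonneg wd _ (show (0:Int) ≤ w * 2 by omega)]
      have hga : PySem.List.pyGetD (wd.set (w * 2).toNat (pvD p (w * 2) + 1)) (w * 3) 0
          = pvD p (w * 3) := by
        rw [e3n, PySem.List.pyGetD_natCast, pv_getD_set _ _ _ _ (by omega),
          if_neg (by omega)]
        exact Hd _ h3lt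
      rw [hga, PySem.List.pySetD_of_nonneg (wd.set (w * 2).toNat (pvD p (w * 2) + 1)) _
        (show (0:Int) ≤ w * 3 by omega)]
      have hgb : PySem.List.pyGetD ((wd.set (w * 2).toNat (pvD p (w * 2) + 1)).set (w * 3).toNat
          (pvD p (w * 3) + 1)) (w * 4) 0 = pvD p (w * 4) := by
        rw [e4n, PySem.List.pyGetD_natCast,
          pv_getD_set _ _ _ _ (by simp only [List.length_set]; omega), if_neg (by omega),
          pv_getD_set _ _ _ _ (by omega), if_neg (by omega)]
        exact Hd _ h4lt
      rw [hgb, PySem.List.pySetD_of_nonneg ((wd.set (w * 2).toNat (pvD p (w * 2) + 1)).set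
          (w * 3).toNat (pvD p (w * 3) + 1)) _ (show (0:Int) ≤ w * 4 by omega)]
      have hcn : 0 ≤ pvCnt p w := pvCnt_nonneg p w
      split_ifs with h <;> simp only [Prod.mk.injEq, and_true] <;>
        first | trivial | omega
    rw [hstep, ih (p ++ [w]) _ _ _ (fun u hu => hl u (List.mem_cons_of_mem _ hu))
      (by simp [hwd]) (by simp [hwa]) ?_ ?_]
    · rw [show pvAPC p (w :: l) = pvAdd p w + pvAPC (p ++ [w]) l from rfl, pvAdd]
      ring
    · -- weights_distance invariant
      intro k hk
      rw [pv_getD_set _ _ _ _ (by simp only [List.length_set]; omega),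
        pv_getD_set _ _ _ _ (by simp only [List.length_set]; omega),
        pv_getD_set _ _ _ _ (by omega), pvD_append]
      have hsing : pvD [w] (k : Int) = (if w * 2 = (k:Int) then 1 else 0)
          + (if w * 3 = (k:Int) then 1 else 0) + (if w * 4 = (k:Int) then 1 else 0) := by
        simp [pvD]
      split_ifs with h4 h3 h2
      · rw [hsing, show ((k:ℕ) : Int) = w * 4 by omega, if_neg (by omega), if_neg (by omega),
          if_pos rfl]
        ring
      · rw [hsing, show ((k:ℕ) : Int) = w * 3 by omega, if_neg (by omega), if_pos rfl,
          if_neg (by omega)]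
        ring
      · rw [hsing, show ((k:ℕ) : Int) = w * 2 by omega, if_pos rfl, if_neg (by omega),
          if_neg (by omega)]
        ring
      · rw [hsing, if_neg (by omega), if_neg (by omega), if_neg (by omega), Hd _ hk]
        ring
    · -- weight_arr invariant
      intro k hk
      rw [pv_getD_set _ _ _ _ (by omega), pvCnt_append]
      have hsing := pvCnt_singleton w ((k:ℕ) : Int)
      split_ifs with h
      · rw [hsing, show ((k:ℕ) : Int) = w by omega, if_pos rfl]
      · rw [hsing, if_neg (by omega), Ha _ hk]; ring

lemma solution_eq_APC (ws : List Int) (h : Pre_solution ws) : solution ws = pvAPC [] ws := by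
  have hloop := solution_loop ws [] 0 (List.replicate 4001 0) (List.replicate 1001 0) h
    List.length_replicate List.length_replicate
    (fun k hk => by rw [pv_getD_replicate _ _ hk]; simp [pvD])
    (fun k hk => by rw [pv_getD_replicate _ _ hk]; simp [pvCnt])
  show (ws.foldl solutionStep (0, List.replicate 4001 0, List.replicate 1001 0)).1 = pvAPC [] ws
  rw [hloop]
  ring

-- pointwise: what one earlier w contributes when u passes, as 7 partner indicators
lemma pvAdd_single (w u : Int) (_hw : 1 ≤ w) (_hu : 1 ≤ u) :
    pvAdd [w] u = (if u = w then 1 else 0) + (if u = 2 * w then 1 else 0)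
      + (if u * 2 = w * 3 then 1 else 0) + (if u * 2 = w then 1 else 0)
      + (if u * 3 = w * 4 then 1 else 0) + (if u * 3 = w * 2 then 1 else 0)
      + (if u * 4 = w * 3 then 1 else 0) := by
  have hc := pvCnt_singleton w u
  simp only [pvAdd, pvD, List.map_cons, List.map_nil, List.sum_cons, List.sum_nil, hc, add_zero]
  rw [if_congr (show w * 2 = u * 2 ↔ u = w by omega) rfl rfl,
      if_congr (show w * 3 = u * 2 ↔ u * 2 = w * 3 by omega) rfl rfl,
      if_congr (show w * 4 = u * 2 ↔ u = 2 * w by omega) rfl rfl,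
      if_congr (show w * 2 = u * 3 ↔ u * 3 = w * 2 by omega) rfl rfl,
      if_congr (show w * 3 = u * 3 ↔ u = w by omega) rfl rfl,
      if_congr (show w * 4 = u * 3 ↔ u * 3 = w * 4 by omega) rfl rfl,
      if_congr (show w * 2 = u * 4 ↔ u * 2 = w by omega) rfl rfl,
      if_congr (show w * 3 = u * 4 ↔ u * 4 = w * 3 by omega) rfl rfl,
      if_congr (show w * 4 = u * 4 ↔ u = w by omega) rfl rfl]
  generalize (if u = w then (1:Int) else 0) = x1
  generalize (if u = 2 * w then (1:Int) else 0) = x2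
  generalize (if u * 2 = w * 3 then (1:Int) else 0) = x3
  generalize (if u * 2 = w then (1:Int) else 0) = x4
  generalize (if u * 3 = w * 4 then (1:Int) else 0) = x5
  generalize (if u * 3 = w * 2 then (1:Int) else 0) = x6
  generalize (if u * 4 = w * 3 then (1:Int) else 0) = x7
  ring

lemma pv_ite_add (c : Prop) [Decidable c] (x y : Int) :
    (if c then x + y else 0) = (if c then x else 0) + (if c then y else 0) := by
  split_ifs <;> ring

lemma pvHd_nil (w : Int) : pvHd [] w = 0 := by
  simp only [pvHd, pvCnt, List.count_nil, Int.natCast_zero]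
  split_ifs <;> ring

lemma pvHd_cons (l : List Int) (u w : Int) (hu : 1 ≤ u) (hw : 1 ≤ w) :
    pvHd (u :: l) w = pvHd l w + pvAdd [w] u := by
  rw [pvAdd_single w u hw hu]
  unfold pvHd
  simp only [pvCnt_cons, pv_ite_add]
  have c1 : (if w = u then (1:Int) else 0) = if u = w then 1 else 0 := if_congr eq_comm rfl rfl
  have c2 : (if 2 * w = u then (1:Int) else 0) = if u = 2 * w then 1 else 0 :=
    if_congr eq_comm rfl rfl
  have c3 : (if w % 2 = 0 then (if 3 * w / 2 = u then (1:Int) else 0) else 0)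
      = if u * 2 = w * 3 then 1 else 0 := by
    by_cases h : w % 2 = 0
    · rw [if_pos h]; exact if_congr (by omega) rfl rfl
    · rw [if_neg h, if_neg (by omega)]
  have c4 : (if w % 2 = 0 then (if w / 2 = u then (1:Int) else 0) else 0)
      = if u * 2 = w then 1 else 0 := by
    by_cases h : w % 2 = 0
    · rw [if_pos h]; exact if_congr (by omega) rfl rfl
    · rw [if_neg h, if_neg (by omega)]
  have c5 : (if w % 3 = 0 then (if 4 * w / 3 = u then (1:Int) else 0) else 0)
      = if u * 3 = w * 4 then 1 else 0 := by
    by_cases h : w % 3 = 0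
    · rw [if_pos h]; exact if_congr (by omega) rfl rfl
    · rw [if_neg h, if_neg (by omega)]
  have c6 : (if w % 3 = 0 then (if 2 * w / 3 = u then (1:Int) else 0) else 0)
      = if u * 3 = w * 2 then 1 else 0 := by
    by_cases h : w % 3 = 0
    · rw [if_pos h]; exact if_congr (by omega) rfl rfl
    · rw [if_neg h, if_neg (by omega)]
  have c7 : (if w % 4 = 0 then (if 3 * w / 4 = u then (1:Int) else 0) else 0)
      = if u * 4 = w * 3 then 1 else 0 := by
    by_cases h : w % 4 = 0
    · rw [if_pos h]; exact if_congr (by omega) rfl rfl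
    · rw [if_neg h, if_neg (by omega)]
  rw [c1, c2, c3, c4, c5, c6, c7]
  ring

lemma pvCR_single (l : List Int) (w : Int) (hl : ∀ u ∈ l, 1 ≤ u) (hw : 1 ≤ w) :
    pvCR [w] l = pvHd l w := by
  induction l with
  | nil => rw [pvHd_nil]; simp [pvCR]
  | cons u l ih =>
    have hu := hl u List.mem_cons_self
    have hl' : ∀ u ∈ l, 1 ≤ u := fun v hv => hl v (List.mem_cons_of_mem _ hv)
    simp only [pvCR, List.map_cons, List.sum_cons] at *
    rw [pvHd_cons l u w hu hw, ih hl']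
    ring

lemma pvAPC_nil_eq_G (ws : List Int) (h : Pre_solution ws) : pvAPC [] ws = pvG ws := by
  induction ws with
  | nil => rfl
  | cons w l ih =>
    have hw := (h w List.mem_cons_self).1
    have hl : Pre_solution l := fun u hu => h u (List.mem_cons_of_mem _ hu)
    have e : pvAPC [] (w :: l) = pvAdd [] w + pvAPC [w] l := rfl
    rw [e, pvAdd_nil, pvAPC_eq l [w], pvCR_single l w (fun u hu => (hl u hu).1) hw, ih hl,
      show pvG (w :: l) = pvHd l w + pvG l from rfl]
    ring

-- ===== B side =====

lemma pv_fold_partners (d : PySem.Dict Int Int) (ws : List Int) (bs : List Int) (n a : Int)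
    (hget : ∀ b, d.getD b 0 = pvCnt ws b)
    (hzero : ∀ b, d.contains b = false → pvCnt ws b = 0)
    (hab : ∀ b ∈ bs, a < b) : ∀ z : Int,
    bs.foldl (fun acc b => if a < b ∧ d.contains b then acc + n * d.getD b 0 else acc) z
      = z + n * (bs.map (pvCnt ws)).sum := by
  induction bs with
  | nil => intro z; simp
  | cons b bs ih =>
    intro z
    rw [List.foldl_cons]
    have hone : (if a < b ∧ d.contains b then z + n * d.getD b 0 else z) = z + n * pvCnt ws b := by
      by_cases hc : d.contains b = true
      · rw [if_pos ⟨hab b List.mem_cons_self, hc⟩, hget b]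
      · rw [if_neg (fun hh => hc hh.2), hzero b (by simpa using hc)]; ring
    rw [hone, ih (fun v hv => hab v (List.mem_cons_of_mem _ hv))]
    simp only [List.map_cons, List.sum_cons]
    ring

lemma pvAltStep_eq (ws : List Int) (ans : Int) (a n : Int) (ha : 1 ≤ a) :
    solutionAltStep (PySem.Dict.counter ws) ans (a, n)
      = ans + (pvC2 n + n * pvP ws a) := by
  have hget : ∀ b, (PySem.Dict.counter ws).getD b 0 = pvCnt ws b := fun b =>
    PySem.Dict.getD_counter ws b
  have hzero : ∀ b : Int, (PySem.Dict.counter ws).contains b = false → pvCnt ws b = 0 := by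
    intro b hb
    rw [PySem.Dict.contains_counter] at hb
    have : b ∉ ws := by simpa using hb
    simp [pvCnt, List.count_eq_zero.mpr this]
  have m2 : PySem.Int.mod a 2 = a % 2 := PySem.Int.mod_eq_emod_of_pos (by norm_num)
  have m3 : PySem.Int.mod a 3 = a % 3 := PySem.Int.mod_eq_emod_of_pos (by norm_num)
  have f2 : PySem.Int.floordiv (3 * a) 2 = 3 * a / 2 :=
    PySem.Int.floordiv_eq_ediv_of_pos (by norm_num)
  have f3 : PySem.Int.floordiv (4 * a) 3 = 4 * a / 3 :=
    PySem.Int.floordiv_eq_ediv_of_pos (by norm_num)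
  simp only [solutionAltStep, m2, m3, f2, f3]
  by_cases h2 : a % 2 = 0 <;> by_cases h3 : a % 3 = 0
  · rw [if_pos h2, if_pos h3,
      show ([2 * a] ++ [3 * a / 2]) ++ [4 * a / 3] = [2 * a, 3 * a / 2, 4 * a / 3] from rfl,
      pv_fold_partners _ ws _ n a hget hzero (by
        intro b hbm
        simp only [List.mem_cons, List.not_mem_nil, or_false] at hbm
        rcases hbm with rfl | rfl | rfl <;> omega)]
    simp only [List.map_cons, List.map_nil, List.sum_cons, List.sum_nil]
    rw [pvP, if_pos h2, if_pos h3,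
      show PySem.Int.floordiv (n * (n - 1)) 2 = pvC2 n from rfl]
    ring
  · rw [if_pos h2, if_neg h3,
      show ([2 * a] ++ [3 * a / 2]) = [2 * a, 3 * a / 2] from rfl,
      pv_fold_partners _ ws _ n a hget hzero (by
        intro b hbm
        simp only [List.mem_cons, List.not_mem_nil, or_false] at hbm
        rcases hbm with rfl | rfl <;> omega)]
    simp only [List.map_cons, List.map_nil, List.sum_cons, List.sum_nil]
    rw [pvP, if_pos h2, if_neg h3,
      show PySem.Int.floordiv (n * (n - 1)) 2 = pvC2 n from rfl]
    ring
  · rw [if_neg h2, if_pos h3,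
      show ([2 * a] ++ [4 * a / 3]) = [2 * a, 4 * a / 3] from rfl,
      pv_fold_partners _ ws _ n a hget hzero (by
        intro b hbm
        simp only [List.mem_cons, List.not_mem_nil, or_false] at hbm
        rcases hbm with rfl | rfl <;> omega)]
    simp only [List.map_cons, List.map_nil, List.sum_cons, List.sum_nil]
    rw [pvP, if_neg h2, if_pos h3,
      show PySem.Int.floordiv (n * (n - 1)) 2 = pvC2 n from rfl]
    ring
  · rw [if_neg h2, if_neg h3,
      pv_fold_partners _ ws _ n a hget hzero (by
        intro b hbm
        simp only [List.mem_cons, List.not_mem_nil, or_false] at hbm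
        rcases hbm with rfl <;> omega)]
    simp only [List.map_cons, List.map_nil, List.sum_cons, List.sum_nil]
    rw [pvP, if_neg h2, if_neg h3,
      show PySem.Int.floordiv (n * (n - 1)) 2 = pvC2 n from rfl]
    ring

lemma pv_sum_ofList (ws : List Int) (f : Int → Int) :
    ((PySem.Set.ofList ws).map f).sum = ∑ a ∈ ws.toFinset, f a := by
  rw [← List.sum_toFinset f (PySem.Set.nodup_ofList ws)]
  congr 1
  ext x
  simp [List.mem_toFinset, PySem.Set.mem_ofList]

lemma solution_alt_eq (ws : List Int) (h : Pre_solution ws) : solution_alt ws = pvSF ws := by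
  have hcong : ∀ x ∈ List.map (fun k => (k, (List.count k ws : Int))) (PySem.Set.ofList ws),
      ∀ acc : Int, solutionAltStep (PySem.Dict.counter ws) acc x
        = acc + (pvC2 x.2 + x.2 * pvP ws x.1) := by
    intro x hx acc
    obtain ⟨k, hk, rfl⟩ := List.mem_map.mp hx
    exact pvAltStep_eq ws acc k _ ((h k ((PySem.Set.mem_ofList ws k).mp hk)).1)
  show ((ws.foldl (fun d w => d.insert w (d.getD w 0 + 1)) PySem.Dict.empty)).items.foldl
      (solutionAltStep (ws.foldl (fun d w => d.insert w (d.getD w 0 + 1)) PySem.Dict.empty)) 0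
      = pvSF ws
  rw [PySem.Dict.foldl_insert_getD_add_one_eq_counter, PySem.Dict.items_counter,
    PySem.List.foldl_congr_mem' _ _ _ _ hcong, PySem.List.foldl_add, List.map_map,
    show ((fun (x : Int × Int) => pvC2 x.2 + x.2 * pvP ws x.1) ∘
      (fun k => (k, (List.count k ws : Int)))) = fun k => pvF ws k from rfl,
    pv_sum_ofList ws (fun k => pvF ws k)]
  rw [pvSF]
  omega

-- ===== grouping: pvG equals the distinct-weight sum =====

lemma pvC2_zero : pvC2 0 = 0 := by decide

lemma pvC2_succ (n : Int) (hn : 0 ≤ n) : pvC2 (n + 1) = pvC2 n + n := by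
  obtain ⟨k, hk⟩ := Int.even_mul_succ_self (n - 1)
  have e : (n - 1) * (n - 1 + 1) = n * (n - 1) := by ring
  have hk' : n * (n - 1) = 2 * k := by linarith [hk, e]
  have h2 : (n + 1) * (n + 1 - 1) = n * (n - 1) + 2 * n := by ring
  unfold pvC2
  rw [h2, hk', PySem.Int.floordiv_eq_ediv_of_pos (by norm_num),
    PySem.Int.floordiv_eq_ediv_of_pos (by norm_num)]
  omega

lemma pvF_zero (l : List Int) (w : Int) (h : w ∉ l) : pvF l w = 0 := by
  have : pvCnt l w = 0 := by simp [pvCnt, List.count_eq_zero.mpr h]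
  simp [pvF, this, pvC2_zero]

lemma pvP_cons (l : List Int) (a w : Int) (_ha : 1 ≤ a) :
    pvP (w :: l) a = pvP l a + pvE a w := by
  unfold pvP pvE
  simp only [pvCnt_cons, pv_ite_add]
  have c2 : (if a % 2 = 0 then (if 3 * a / 2 = w then (1:Int) else 0) else 0)
      = if a % 2 = 0 ∧ 3 * a / 2 = w then 1 else 0 := by
    by_cases h : a % 2 = 0 <;> simp [h]
  have c3 : (if a % 3 = 0 then (if 4 * a / 3 = w then (1:Int) else 0) else 0)
      = if a % 3 = 0 ∧ 4 * a / 3 = w then 1 else 0 := by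
    by_cases h : a % 3 = 0 <;> simp [h]
  rw [c2, c3]
  ring

lemma pvF_cons_ne (l : List Int) (a w : Int) (ha : 1 ≤ a) (hne : a ≠ w) :
    pvF (w :: l) a = pvF l a + pvCnt l a * pvE a w := by
  unfold pvF
  rw [pvCnt_cons, if_neg hne, add_zero, pvP_cons l a w ha]
  ring

lemma pvF_cons_self (l : List Int) (w : Int) (hw : 1 ≤ w) :
    pvF (w :: l) w = pvF l w + pvCnt l w + pvP l w := by
  unfold pvF
  rw [pvCnt_cons, if_pos rfl, pvP_cons l w w hw]
  have hE : pvE w w = 0 := by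
    unfold pvE
    rw [if_neg (by omega), if_neg (by omega), if_neg (by omega)]
    ring
  rw [hE, pvC2_succ _ (pvCnt_nonneg l w)]
  ring

lemma pv_sum_pick (t : Finset Int) (l : List Int) (c : Int → Prop) [DecidablePred c] (v : Int)
    (hiff : ∀ a ∈ t, (c a ↔ a = v)) (hv : v ∉ t → pvCnt l v = 0) :
    (∑ a ∈ t, pvCnt l a * (if c a then 1 else 0)) = pvCnt l v := by
  rw [Finset.sum_congr rfl (fun a ha => show pvCnt l a * (if c a then 1 else 0)
      = if a = v then pvCnt l v else 0 from by
    rw [if_congr (hiff a ha) rfl rfl]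
    split_ifs with h
    · rw [h]; ring
    · ring)]
  rw [Finset.sum_ite_eq' t v (fun _ => pvCnt l v)]
  split_ifs with h
  · rfl
  · exact (hv h).symm

lemma pv_sum_pick0 (t : Finset Int) (l : List Int) (c : Int → Prop) [DecidablePred c]
    (h : ∀ a ∈ t, ¬ c a) :
    (∑ a ∈ t, pvCnt l a * (if c a then 1 else 0)) = 0 := by
  rw [Finset.sum_congr rfl (fun a ha => show pvCnt l a * (if c a then 1 else 0) = 0 from by
    rw [if_neg (h a ha)]; ring)]
  exact Finset.sum_const_zero

lemma pv_sum_erase (l : List Int) (w : Int) (hw : 1 ≤ w) :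
    (∑ a ∈ l.toFinset.erase w, pvCnt l a * pvE a w)
      = (if w % 2 = 0 then pvCnt l (w / 2) else 0)
        + (if w % 3 = 0 then pvCnt l (2 * w / 3) else 0)
        + (if w % 4 = 0 then pvCnt l (3 * w / 4) else 0) := by
  have hsplit : ∀ a ∈ l.toFinset.erase w, pvCnt l a * pvE a w
      = pvCnt l a * (if 2 * a = w then 1 else 0)
        + pvCnt l a * (if a % 2 = 0 ∧ 3 * a / 2 = w then 1 else 0)
        + pvCnt l a * (if a % 3 = 0 ∧ 4 * a / 3 = w then 1 else 0) := by
    intro a _; unfold pvE; ring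
  rw [Finset.sum_congr rfl hsplit, Finset.sum_add_distrib, Finset.sum_add_distrib]
  have hmem : ∀ v : Int, v ≠ w → (v ∉ l.toFinset.erase w → pvCnt l v = 0) := by
    intro v hvw hnot
    by_cases hin : v ∈ l
    · exact absurd (Finset.mem_erase.mpr ⟨hvw, List.mem_toFinset.mpr hin⟩) hnot
    · simp [pvCnt, List.count_eq_zero.mpr hin]
  have t1 : (∑ a ∈ l.toFinset.erase w, pvCnt l a * (if 2 * a = w then 1 else 0))
      = if w % 2 = 0 then pvCnt l (w / 2) else 0 := by
    by_cases h : w % 2 = 0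
    · rw [if_pos h, pv_sum_pick _ l _ (w / 2) (fun a _ => by omega) (hmem _ (by omega))]
    · rw [if_neg h, pv_sum_pick0 _ l _ (fun a _ => by omega)]
  have t2 : (∑ a ∈ l.toFinset.erase w, pvCnt l a * (if a % 2 = 0 ∧ 3 * a / 2 = w then 1 else 0))
      = if w % 3 = 0 then pvCnt l (2 * w / 3) else 0 := by
    by_cases h : w % 3 = 0
    · rw [if_pos h, pv_sum_pick _ l _ (2 * w / 3) (fun a _ => by omega) (hmem _ (by omega))]
    · rw [if_neg h, pv_sum_pick0 _ l _ (fun a _ => by omega)]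
  have t3 : (∑ a ∈ l.toFinset.erase w, pvCnt l a * (if a % 3 = 0 ∧ 4 * a / 3 = w then 1 else 0))
      = if w % 4 = 0 then pvCnt l (3 * w / 4) else 0 := by
    by_cases h : w % 4 = 0
    · rw [if_pos h, pv_sum_pick _ l _ (3 * w / 4) (fun a _ => by omega) (hmem _ (by omega))]
    · rw [if_neg h, pv_sum_pick0 _ l _ (fun a _ => by omega)]
  rw [t1, t2, t3]

lemma pvSF_cons (l : List Int) (w : Int) (hw : 1 ≤ w) (hl : ∀ u ∈ l, 1 ≤ u) :
    pvSF (w :: l) = pvSF l + pvHd l w := by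
  unfold pvSF
  rw [List.toFinset_cons]
  have hins : insert w l.toFinset = insert w (l.toFinset.erase w) := by
    ext x
    simp only [Finset.mem_insert, Finset.mem_erase]
    constructor
    · rintro (h | h)
      · exact Or.inl h
      · by_cases hx : x = w
        · exact Or.inl hx
        · exact Or.inr ⟨hx, h⟩
    · rintro (h | h)
      · exact Or.inl h
      · exact Or.inr h.2
  rw [hins, Finset.sum_insert (Finset.notMem_erase _ _)]
  have hcong : (∑ a ∈ l.toFinset.erase w, pvF (w :: l) a)
      = ∑ a ∈ l.toFinset.erase w, (pvF l a + pvCnt l a * pvE a w) := by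
    refine Finset.sum_congr rfl (fun a ha => ?_)
    have hane : a ≠ w := (Finset.mem_erase.mp ha).1
    have hal : a ∈ l := List.mem_toFinset.mp (Finset.mem_erase.mp ha).2
    exact pvF_cons_ne l a w (hl a hal) hane
  rw [hcong, Finset.sum_add_distrib]
  have hsplit : (∑ a ∈ l.toFinset.erase w, pvF l a) + pvF l w = ∑ a ∈ l.toFinset, pvF l a := by
    by_cases hws : w ∈ l.toFinset
    · exact Finset.sum_erase_add _ _ hws
    · rw [Finset.erase_eq_of_notMem hws,
        pvF_zero l w (fun hin => hws (List.mem_toFinset.mpr hin))]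
      ring
  have hpick := pv_sum_erase l w hw
  have hself := pvF_cons_self l w hw
  have hHd : pvHd l w = pvCnt l w + pvP l w
      + ((if w % 2 = 0 then pvCnt l (w / 2) else 0) + (if w % 3 = 0 then pvCnt l (2 * w / 3) else 0)
        + (if w % 4 = 0 then pvCnt l (3 * w / 4) else 0)) := by
    unfold pvHd pvP; ring
  linarith [hsplit, hpick, hself, hHd]

lemma pvG_eq_SF (ws : List Int) (h : Pre_solution ws) : pvG ws = pvSF ws := by
  induction ws with
  | nil => simp [pvG, pvSF]
  | cons w l ih =>
    have hw := (h w List.mem_cons_self).1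
    have hl : Pre_solution l := fun u hu => h u (List.mem_cons_of_mem _ hu)
    rw [show pvG (w :: l) = pvHd l w + pvG l from rfl, ih hl,
      pvSF_cons l w hw (fun u hu => (hl u hu).1)]
    ring

-- ===== VERDICT (by name: the statement is the Claim_ definition above) =====
theorem solution_spec : Claim_equal_solution := by
  intro ws _ hpre
  show solution ws = solution_alt ws
  rw [solution_eq_APC ws hpre, solution_alt_eq ws hpre, pvAPC_nil_eq_G ws hpre,
    pvG_eq_SF ws hpre]
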